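-- pv_equiv track=rewrite | github.com/HemantS404/Unicode_Interview_Tasks | task1.py | b_dict
-- ===== SOURCE A (Python) =====
-- def b_dict(a, b):                                           #defining function taking 2 inputs
--     dict = {}                                               #declaring empty dictonary
--     for i in range(a,b):
--         b_i = bin(i)                                        #bin() converts a number to binary
--         if '11' in b_i:                                     #check consecutive 1s exsits in the binary notation of a number
--             dict[i] = True                                  #adding key-value pair in dictonary
--         else:                                               #key is the number and value either True of False
--             dict[i] = False
--     return dict
-- ===== SOURCE B (Python) =====
-- def b_dict(a, b):
--     def adj(n):
--         return (n & (n >> 1)) != 0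
--     return {i: adj(abs(i)) for i in range(a, b)}
-- ===== Notes on version B (the rewrite author's own statement) =====
-- stated objective: alternative
-- what changed: B replaces the string test "'11' in bin(i)" by the bitwise adjacency test (abs(i) & (abs(i) >> 1)) != 0 and builds the dict with a comprehension over the distinct range keys, so no binary string is ever materialised.
import Mathlib
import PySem

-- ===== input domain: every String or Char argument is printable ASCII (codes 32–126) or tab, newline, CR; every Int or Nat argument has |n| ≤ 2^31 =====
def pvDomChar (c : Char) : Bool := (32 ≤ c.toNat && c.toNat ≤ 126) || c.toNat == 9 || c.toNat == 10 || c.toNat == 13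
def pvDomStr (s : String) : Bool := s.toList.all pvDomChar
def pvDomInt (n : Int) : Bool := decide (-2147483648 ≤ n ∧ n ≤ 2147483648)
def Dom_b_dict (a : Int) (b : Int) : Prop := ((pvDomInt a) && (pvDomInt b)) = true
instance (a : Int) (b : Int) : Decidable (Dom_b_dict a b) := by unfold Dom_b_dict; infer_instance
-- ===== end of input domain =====

-- B replaces the substring test '11' in bin(i) by the bitwise adjacency test (|i| & (|i| >> 1)) != 0
-- and builds the dict by a comprehension over the (distinct) range keys; objective: alternative.

-- ===== PORT A =====
def b_dict (a : Int) (b : Int) : List (Int × Bool) :=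
  ((PySem.List.pyRange a b 1).foldl
      (fun d i => d.insert i (PySem.Str.isIn "11" (PySem.Int.pyBin i)))
      PySem.Dict.empty).items

-- ===== PORT B =====
-- helper adj(n) of Source B
def pvAdj (n : Nat) : Bool := decide (n &&& (n >>> 1) ≠ 0)

def b_dict_alt (a : Int) (b : Int) : List (Int × Bool) :=
  (PySem.List.pyRange a b 1).map (fun i => (i, pvAdj i.natAbs))

-- ===== PRECONDITION & SPEC =====
def Spec_b_dict (a : Int) (b : Int) (out : List (Int × Bool)) : Prop := out = b_dict_alt a b
instance (a : Int) (b : Int) (out : List (Int × Bool)) : Decidable (Spec_b_dict a b out) := by unfold Spec_b_dict; infer_instance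

-- ===== CLAIM (what is proved, stated in full; the proofs are below) =====
def Claim_equal_b_dict : Prop := ∀ (a : Int) (b : Int), Dom_b_dict a b → Spec_b_dict a b (b_dict a b)

-- ===== LEMMAS AND PROOFS =====

-- canonical (fuel-free) form of Nat.toDigits 2
def pvRep (n : Nat) : List Char :=
  if n < 2 then [Nat.digitChar (n % 2)]
  else pvRep (n / 2) ++ [Nat.digitChar (n % 2)]
termination_by n
decreasing_by omega

theorem pvToDigitsCore_eq : ∀ (f n : Nat) (l : List Char), n < f →
    Nat.toDigitsCore 2 f n l = pvRep n ++ l := by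
  intro f
  induction f with
  | zero => intro n l h; omega
  | succ f ih =>
    intro n l h
    rw [pvRep]
    by_cases h2 : n < 2
    · have : n / 2 = 0 := by omega
      simp [Nat.toDigitsCore, this, h2]
    · have : ¬ n / 2 = 0 := by omega
      simp only [Nat.toDigitsCore, this, if_false, h2]
      rw [ih (n / 2) _ (by omega)]
      simp

theorem pvToDigits_eq (n : Nat) : Nat.toDigits 2 n = pvRep n := by
  have := pvToDigitsCore_eq (n + 1) n [] (by omega)
  simpa [Nat.toDigits] using this

theorem pvRep_getLast (n : Nat) : (pvRep n).getLast? = some (Nat.digitChar (n % 2)) := by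
  rw [pvRep]
  split
  · rfl
  · exact List.getLast?_concat

theorem pvDigitChar_one_iff (m : Nat) (hm : m < 2) : Nat.digitChar m = '1' ↔ m = 1 := by
  interval_cases m <;> simp [Nat.digitChar]

-- ['1','1'] as an infix of c :: l, c ≠ '1'
theorem pvInfix11_cons (c : Char) (l : List Char) (hc : c ≠ '1') :
    (['1', '1'] <:+: c :: l) ↔ (['1', '1'] <:+: l) := by
  rw [List.infix_cons_iff]
  constructor
  · rintro (hp | h)
    · rw [List.cons_prefix_cons] at hp; exact absurd hp.1.symm hc
    · exact h
  · exact Or.inr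

-- ['1','1'] as an infix of l ++ [c]
theorem pvSingle_prefix_iff (ys : List Char) : (['1'] <+: ys) ↔ ys.head? = some '1' := by
  cases ys with
  | nil => simp
  | cons h t => simp [List.cons_prefix_cons, eq_comm]

theorem pvInfix11_reverse (l : List Char) : (['1', '1'] <:+: l.reverse) ↔ (['1', '1'] <:+: l) := by
  constructor <;> intro h <;> simpa using h.reverse

theorem pvInfix11_snoc (l : List Char) (c : Char) :
    (['1', '1'] <:+: l ++ [c]) ↔ (['1', '1'] <:+: l) ∨ (l.getLast? = some '1' ∧ c = '1') := by
  rw [← pvInfix11_reverse (l ++ [c])]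
  simp only [List.reverse_append, List.reverse_singleton, List.singleton_append]
  rw [List.infix_cons_iff, List.cons_prefix_cons, pvSingle_prefix_iff, List.head?_reverse,
    pvInfix11_reverse]
  tauto

theorem pvRep_infix_iff (n : Nat) :
    (['1', '1'] <:+: pvRep n) ↔ ∃ j, n.testBit j ∧ n.testBit (j + 1) := by
  induction n using Nat.strong_induction_on with
  | _ n ih =>
    rw [pvRep]
    by_cases h2 : n < 2
    · simp only [if_pos h2]
      constructor
      · intro h; have := h.length_le; simp at this
      · rintro ⟨j, _, hb⟩
        have : n / 2 = 0 := by omega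
        rw [Nat.testBit_succ, this, Nat.zero_testBit] at hb
        exact absurd hb (by simp)
    · simp only [if_neg h2]
      rw [pvInfix11_snoc, ih (n / 2) (by omega), pvRep_getLast]
      constructor
      · rintro (⟨j, h1, h2⟩ | ⟨hl, hc⟩)
        · exact ⟨j + 1, by rw [Nat.testBit_succ]; exact h1, by rw [Nat.testBit_succ]; exact h2⟩
        · refine ⟨0, ?_, ?_⟩
          · rw [Nat.testBit_zero]
            simp [(pvDigitChar_one_iff (n % 2) (by omega)).mp hc]
          · rw [Nat.testBit_succ, Nat.testBit_zero]
            have hl' : Nat.digitChar (n / 2 % 2) = '1' := by injection hl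
            simp [(pvDigitChar_one_iff (n / 2 % 2) (by omega)).mp hl']
      · rintro ⟨j, h1, hj1⟩
        cases j with
        | zero =>
          right
          rw [Nat.testBit_zero] at h1
          rw [Nat.testBit_succ, Nat.testBit_zero] at hj1
          constructor
          · rw [(by simpa using hj1 : n / 2 % 2 = 1)]; rfl
          · rw [(by simpa using h1 : n % 2 = 1)]; rfl
        | succ k =>
          left
          exact ⟨k, by rw [← Nat.testBit_succ]; exact h1, by rw [← Nat.testBit_succ]; exact hj1⟩

theorem pvLand_ne_zero_iff (n m : Nat) :
    n &&& m ≠ 0 ↔ ∃ j, n.testBit j ∧ m.testBit j := by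
  constructor
  · intro h
    by_contra hc
    push Not at hc
    apply h
    apply Nat.eq_of_testBit_eq
    intro i
    rw [Nat.testBit_land, Nat.zero_testBit]
    by_cases h1 : n.testBit i
    · simp [h1, hc i h1]
    · simp [h1]
  · rintro ⟨j, h1, h2⟩ h0
    have := Nat.testBit_land n m j
    rw [h0, Nat.zero_testBit, h1, h2] at this
    simp at this

theorem pvAdj_iff (m : Nat) : pvAdj m = true ↔ ∃ j, m.testBit j ∧ m.testBit (j + 1) := by
  unfold pvAdj
  rw [decide_eq_true_iff, pvLand_ne_zero_iff]
  constructor <;> rintro ⟨j, h1, h2⟩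
  · exact ⟨j, h1, by rwa [Nat.testBit_shiftRight, Nat.add_comm] at h2⟩
  · exact ⟨j, h1, by rwa [Nat.testBit_shiftRight, Nat.add_comm]⟩

theorem pvPred_eq (i : Int) :
    PySem.Str.isIn "11" (PySem.Int.pyBin i) = pvAdj i.natAbs := by
  rw [Bool.eq_iff_iff, PySem.Str.isIn_iff_infix, PySem.Int.toList_pyBin, pvAdj_iff]
  have h11 : ("11" : String).toList = ['1', '1'] := rfl
  rw [h11]
  have key : (['1', '1'] <:+: Nat.toDigits 2 i.natAbs) ↔ ∃ j, i.natAbs.testBit j ∧ i.natAbs.testBit (j + 1) := by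
    rw [pvToDigits_eq, pvRep_infix_iff]
  unfold PySem.Int.toBinChars0b
  by_cases h : i < 0
  · rw [if_pos h, pvInfix11_cons _ _ (by decide), pvInfix11_cons _ _ (by decide),
      pvInfix11_cons _ _ (by decide)]
    exact key
  · rw [if_neg h]
    have ht : i.toNat = i.natAbs := by omega
    rw [ht, pvInfix11_cons _ _ (by decide), pvInfix11_cons _ _ (by decide)]
    exact key

-- ===== VERDICT (by name: the statement is the Claim_ definition above) =====
theorem b_dict_spec : Claim_equal_b_dict := by
  intro a b _
  unfold Spec_b_dict b_dict b_dict_alt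
  rw [PySem.Dict.items_foldl_insert_fresh (PySem.List.pyRange a b 1) (fun i => i)
      (fun i => PySem.Str.isIn "11" (PySem.Int.pyBin i)) PySem.Dict.empty
      (fun _ _ => PySem.Dict.contains_empty _)
      (by simpa using PySem.List.nodup_pyRange_one a b)]
  have hempty : (PySem.Dict.empty : PySem.Dict Int Bool).items = [] := rfl
  rw [hempty, List.nil_append]
  exact List.map_congr_left (fun i _ => by rw [pvPred_eq i])
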